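-- pv_equiv track=rewrite | github.com/empty-block/vibe-playlist | data/pipelines/metadata_extractor/lib/metadata_extractor.py | extract_youtube_music_metadata
-- ===== SOURCE A (Python) =====
-- from typing import Dict, List, Optional, Any
--
-- def extract_youtube_music_metadata(metadata: Dict) -> str:
--     """Extract key YouTube Music metadata into clean format"""
--     try:
--         # Get title from Open Graph and clean it
--         title = None
--         if 'opengraph' in metadata:
--             for og_section in metadata['opengraph']:
--                 for prop in og_section.get('properties', []):
--                     if prop[0] == 'og:title':
--                         raw_title = prop[1]
--                         # Remove "- YouTube Music" suffix
--                         if raw_title.endswith(' - YouTube Music'):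
--                             title = raw_title.replace(' - YouTube Music', '')
--                         else:
--                             title = raw_title
--                         break
--
--         # Get artist from video tags
--         artist = None
--         if 'opengraph' in metadata:
--             for og_section in metadata['opengraph']:
--                 for prop in og_section.get('properties', []):
--                     if prop[0] == 'og:video:tag':
--                         # First tag is usually the artist
--                         artist = prop[1]
--                         break
--
--         # Get image
--         image = None
--         if 'opengraph' in metadata:
--             for og_section in metadata['opengraph']:
--                 for prop in og_section.get('properties', []):
--                     if prop[0] == 'og:image':
--                         image = prop[1]
--                         break
--
--         # Build formatted string
--         parts = []
--         if title:
--             parts.append(f"title - {title}")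
--         if artist:
--             parts.append(f"artist - {artist}")
--         if image:
--             parts.append(f"image - {image}")
--
--         return " | ".join(parts) if parts else "youtube_music - metadata extracted"
--
--     except Exception as e:
--         return f"youtube_music - extraction error: {str(e)}"
-- ===== SOURCE B (Python) =====
-- def extract_youtube_music_metadata(metadata):
--     """Extract key YouTube Music metadata into clean format (single traversal)."""
--     try:
--         title = artist = image = None
--         for section in metadata.get('opengraph', []):
--             t = a = i = None
--             for prop in section.get('properties', []):
--                 key = prop[0]
--                 if t is None and key == 'og:title':
--                     t = prop[1]
--                 elif a is None and key == 'og:video:tag':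
--                     a = prop[1]
--                 elif i is None and key == 'og:image':
--                     i = prop[1]
--                 if t is not None and a is not None and i is not None:
--                     break
--             if t is not None:
--                 title = t.replace(' - YouTube Music', '') if t.endswith(' - YouTube Music') else t
--             if a is not None:
--                 artist = a
--             if i is not None:
--                 image = i
--         parts = [f"{name} - {value}"
--                  for name, value in (('title', title), ('artist', artist), ('image', image))
--                  if value]
--         return " | ".join(parts) if parts else "youtube_music - metadata extracted"
--     except Exception as e:
--         return f"youtube_music - extraction error: {str(e)}"
-- ===== Notes on version B (the rewrite author's own statement) =====
-- stated objective: alternative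
-- what changed: A scans every opengraph section three times (once per key, each inner loop breaking at its first match); B makes a single pass per section with three capture slots (stopping early once all three are filled) and merges the captures into the running title/artist/image, keeping first-in-section/last-section-wins, and builds the parts list by a comprehension instead of three conditional appends.
import Mathlib
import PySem

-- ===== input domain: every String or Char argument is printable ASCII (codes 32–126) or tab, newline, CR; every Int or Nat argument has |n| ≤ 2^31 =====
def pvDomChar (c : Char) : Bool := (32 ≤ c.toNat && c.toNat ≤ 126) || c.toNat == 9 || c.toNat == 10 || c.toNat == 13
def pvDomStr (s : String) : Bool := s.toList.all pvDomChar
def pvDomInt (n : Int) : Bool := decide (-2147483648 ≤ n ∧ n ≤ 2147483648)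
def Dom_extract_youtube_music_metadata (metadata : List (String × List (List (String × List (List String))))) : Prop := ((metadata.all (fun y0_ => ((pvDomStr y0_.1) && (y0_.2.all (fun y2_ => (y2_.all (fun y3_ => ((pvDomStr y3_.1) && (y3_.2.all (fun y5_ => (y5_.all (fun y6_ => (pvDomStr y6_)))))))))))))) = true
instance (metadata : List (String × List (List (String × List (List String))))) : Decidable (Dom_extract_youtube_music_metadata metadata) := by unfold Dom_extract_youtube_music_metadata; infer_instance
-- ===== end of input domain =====

-- B replaces A's three separate scans of every opengraph section by a single per-section pass
-- with three captured slots (objective: alternative decomposition, one traversal instead of three).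
-- Both Pythons return the same error string on malformed property lists (the try/except), so the
-- ports model the IndexError explicitly and the equivalence is total (no Pre_).

-- ===== PORT A =====
-- shared with PORT B: both Pythons contain these identical expressions
def pvErr : String := "youtube_music - extraction error: list index out of range"
-- raw_title.replace(' - YouTube Music', '') if it ends with ' - YouTube Music', else raw_title
def pvClean (raw : String) : String :=
  if PySem.Str.endswith raw " - YouTube Music" then PySem.Str.replace raw " - YouTube Music" "" else raw
-- metadata['opengraph'] if 'opengraph' in metadata else no iterations (A) / metadata.get('opengraph', []) (B)
def pvOG (metadata : List (String × List (List (String × List (List String))))) : List (List (String × List (List String))) :=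
  ((PySem.Dict.mk metadata).get? "opengraph").getD []
-- og_section.get('properties', [])
def pvProps (s : List (String × List (List String))) : List (List String) :=
  ((PySem.Dict.mk s).get? "properties").getD []
-- truthiness of an Optional[str]: None and '' are falsy
def pvTruthy (o : Option String) : Bool := o.getD "" ≠ ""
-- f"{name} - {value}"
def pvPart (name : String) (v : Option String) : String := name ++ " - " ++ v.getD ""

-- A's inner loop of the title scan: break at first 'og:title' in the section (none = IndexError)
def pvScanPropsTitle : List (List String) → Option String → Option (Option String)
  | [], acc => some acc
  | p :: rest, acc =>
    match PySem.List.pyGet? p 0 with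
    | none => none
    | some k =>
      if k = "og:title" then
        match PySem.List.pyGet? p 1 with
        | none => none
        | some raw => some (some (pvClean raw))
      else pvScanPropsTitle rest acc

-- A's inner loop for the artist/image scans: break at first match of `key`
def pvScanProps (key : String) : List (List String) → Option String → Option (Option String)
  | [], acc => some acc
  | p :: rest, acc =>
    match PySem.List.pyGet? p 0 with
    | none => none
    | some k =>
      if k = key then
        match PySem.List.pyGet? p 1 with
        | none => none
        | some v => some (some v)
      else pvScanProps key rest acc

-- A's outer loop of the title scan over all sections
def pvScanSecsTitle : List (List (String × List (List String))) → Option String → Option (Option String)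
  | [], acc => some acc
  | s :: rest, acc =>
    match pvScanPropsTitle (pvProps s) acc with
    | none => none
    | some acc' => pvScanSecsTitle rest acc'

-- A's outer loop for the artist/image scans
def pvScanSecs (key : String) : List (List (String × List (List String))) → Option String → Option (Option String)
  | [], acc => some acc
  | s :: rest, acc =>
    match pvScanProps key (pvProps s) acc with
    | none => none
    | some acc' => pvScanSecs key rest acc'

-- A's tail: parts built by three conditional appends, then joined
def pvBuild (title artist image : Option String) : String :=
  let parts : List String := []
  let parts := if pvTruthy title then parts ++ [pvPart "title" title] else parts
  let parts := if pvTruthy artist then parts ++ [pvPart "artist" artist] else parts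
  let parts := if pvTruthy image then parts ++ [pvPart "image" image] else parts
  if parts = [] then "youtube_music - metadata extracted" else PySem.Str.join " | " parts

def extract_youtube_music_metadata (metadata : List (String × List (List (String × List (List String))))) : String :=
  let og := pvOG metadata
  match pvScanSecsTitle og none with
  | none => pvErr
  | some title =>
    match pvScanSecs "og:video:tag" og none with
    | none => pvErr
    | some artist =>
      match pvScanSecs "og:image" og none with
      | none => pvErr
      | some image => pvBuild title artist image

-- ===== PORT B =====
-- B's single pass over one section's properties: three capture slots, break once all three are filled
def pvPassProps : List (List String) → Option String × Option String × Option String → Option (Option String × Option String × Option String)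
  | [], st => some st
  | p :: rest, (t, a, i) =>
    match PySem.List.pyGet? p 0 with
    | none => none
    | some k =>
      match
        (if t = none ∧ k = "og:title" then
          match PySem.List.pyGet? p 1 with
          | none => none
          | some v => some (some v, a, i)
        else if a = none ∧ k = "og:video:tag" then
          match PySem.List.pyGet? p 1 with
          | none => none
          | some v => some (t, some v, i)
        else if i = none ∧ k = "og:image" then
          match PySem.List.pyGet? p 1 with
          | none => none
          | some v => some (t, a, some v)
        else some (t, a, i)) with
      | none => none
      | some (t', a', i') =>
        if t' ≠ none ∧ a' ≠ none ∧ i' ≠ none then some (t', a', i')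
        else pvPassProps rest (t', a', i')

-- B's outer loop: merge each section's captures into the running title/artist/image
def pvPassSecs : List (List (String × List (List String))) → Option String × Option String × Option String → Option (Option String × Option String × Option String)
  | [], st => some st
  | s :: rest, (tT, aA, iI) =>
    match pvPassProps (pvProps s) (none, none, none) with
    | none => none
    | some (t, a, i) =>
      pvPassSecs rest
        ((match t with | some v => some (pvClean v) | none => tT),
         (match a with | some v => some v | none => aA),
         (match i with | some v => some v | none => iI))

-- B's tail: comprehension with a truthiness filter
def pvBuildAlt (title artist image : Option String) : String :=
  let parts := (([("title", title), ("artist", artist), ("image", image)]).filter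
      (fun nv => pvTruthy nv.2)).map (fun nv => pvPart nv.1 nv.2)
  if parts = [] then "youtube_music - metadata extracted" else PySem.Str.join " | " parts

def extract_youtube_music_metadata_alt (metadata : List (String × List (List (String × List (List String))))) : String :=
  match pvPassSecs (pvOG metadata) (none, none, none) with
  | none => pvErr
  | some (t, a, i) => pvBuildAlt t a i

-- ===== PRECONDITION & SPEC =====
def Spec_extract_youtube_music_metadata (metadata : List (String × List (List (String × List (List String))))) (out : String) : Prop := out = extract_youtube_music_metadata_alt metadata
instance (metadata : List (String × List (List (String × List (List String))))) (out : String) : Decidable (Spec_extract_youtube_music_metadata metadata out) := by unfold Spec_extract_youtube_music_metadata; infer_instance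

-- ===== CLAIM (what is proved, stated in full; the proofs are below) =====
def Claim_equal_extract_youtube_music_metadata : Prop := ∀ (metadata : List (String × List (List (String × List (List String))))), Dom_extract_youtube_music_metadata metadata → Spec_extract_youtube_music_metadata metadata (extract_youtube_music_metadata metadata)

-- ===== LEMMAS AND PROOFS =====

-- a capture slot resolved against a fresh scan: a filled slot wins, an empty slot takes the scan's outcome
def pvRes (slot : Option String) (scan : Option (Option String)) : Option (Option String) :=
  match slot with
  | some v => some (some v)
  | none => scan

-- A's scan with accumulator, in terms of the fresh scan
theorem pvScanProps_acc (key : String) (props : List (List String)) (acc : Option String) :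
    pvScanProps key props acc =
      match pvScanProps key props none with
      | none => none
      | some (some v) => some (some v)
      | some none => some acc := by
  induction props generalizing acc with
  | nil => simp [pvScanProps]
  | cons p rest ih =>
    simp only [pvScanProps]
    cases PySem.List.pyGet? p 0 with
    | none => rfl
    | some k =>
      by_cases hk : k = key
      · simp only [if_pos hk]
        cases PySem.List.pyGet? p 1 <;> rfl
      · simp only [if_neg hk]
        exact ih acc

theorem pvScanPropsTitle_eq (props : List (List String)) (acc : Option String) :
    pvScanPropsTitle props acc =
      match pvScanProps "og:title" props none with
      | none => none
      | some (some v) => some (some (pvClean v))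
      | some none => some acc := by
  induction props generalizing acc with
  | nil => simp [pvScanProps, pvScanPropsTitle]
  | cons p rest ih =>
    simp only [pvScanProps, pvScanPropsTitle]
    cases PySem.List.pyGet? p 0 with
    | none => rfl
    | some k =>
      by_cases hk : k = "og:title"
      · simp only [if_pos hk]
        cases PySem.List.pyGet? p 1 <;> rfl
      · simp only [if_neg hk]
        exact ih acc

set_option maxHeartbeats 1000000 in
theorem pvPassProps_eq (props : List (List String)) :
    ∀ (t a i : Option String), (t = none ∨ a = none ∨ i = none) →
    pvPassProps props (t, a, i) =
      match pvRes t (pvScanProps "og:title" props none),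
            pvRes a (pvScanProps "og:video:tag" props none),
            pvRes i (pvScanProps "og:image" props none) with
      | some x, some y, some z => some (x, y, z)
      | _, _, _ => none := by
  induction props with
  | nil =>
    intro t a i _
    cases t <;> cases a <;> cases i <;> simp [pvPassProps, pvScanProps, pvRes]
  | cons p rest ih =>
    intro t a i h
    simp only [pvPassProps, pvScanProps]
    cases hp0 : PySem.List.pyGet? p 0 with
    | none =>
      cases t <;> cases a <;> cases i <;> simp_all [pvRes]
    | some k =>
      by_cases c1 : t = none ∧ k = "og:title"
      · obtain ⟨ht, hk⟩ := c1; subst ht; subst hk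
        simp only []
        cases hp1 : PySem.List.pyGet? p 1 with
        | none => simp [pvRes]
        | some v =>
          by_cases hf : a ≠ none ∧ i ≠ none
          · obtain ⟨ha, hi⟩ := hf
            cases a with
            | none => exact absurd rfl ha
            | some av =>
              cases i with
              | none => exact absurd rfl hi
              | some iv => simp [pvRes]
          · have hrec := ih (some v) a i (by tauto)
            cases a <;> cases i <;> simp_all [pvRes]
      · by_cases c2 : a = none ∧ k = "og:video:tag"
        · obtain ⟨ha, hk⟩ := c2; subst ha; subst hk
          have hkt : ¬ (t = none ∧ ("og:video:tag" : String) = "og:title") := c1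
          simp only [if_neg c1]
          cases hp1 : PySem.List.pyGet? p 1 with
          | none => cases t <;> simp_all [pvRes]
          | some v =>
            by_cases hf : t ≠ none ∧ i ≠ none
            · obtain ⟨ht, hi⟩ := hf
              cases t with
              | none => exact absurd rfl ht
              | some tv =>
                cases i with
                | none => exact absurd rfl hi
                | some iv => simp_all [pvRes]
            · have hrec := ih t (some v) i (by tauto)
              cases t <;> cases i <;> simp_all [pvRes]
        · by_cases c3 : i = none ∧ k = "og:image"
          · obtain ⟨hi, hk⟩ := c3; subst hi; subst hk
            simp only [if_neg c1, if_neg c2]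
            cases hp1 : PySem.List.pyGet? p 1 with
            | none => cases t <;> cases a <;> simp_all [pvRes]
            | some v =>
              by_cases hf : t ≠ none ∧ a ≠ none
              · obtain ⟨ht, ha⟩ := hf
                cases t with
                | none => exact absurd rfl ht
                | some tv =>
                  cases a with
                  | none => exact absurd rfl ha
                  | some av => simp_all [pvRes]
              · have hrec := ih t a (some v) (by tauto)
                cases t <;> cases a <;> simp_all [pvRes]
          · simp only [if_neg c1, if_neg c2, if_neg c3]
            have hrec := ih t a i h
            cases t <;> cases a <;> cases i <;> simp_all [pvRes]

theorem pvPassSecs_eq (secs : List (List (String × List (List String)))) :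
    ∀ (tT aA iI : Option String),
    pvPassSecs secs (tT, aA, iI) =
      match pvScanSecsTitle secs tT, pvScanSecs "og:video:tag" secs aA, pvScanSecs "og:image" secs iI with
      | some x, some y, some z => some (x, y, z)
      | _, _, _ => none := by
  induction secs with
  | nil => intro tT aA iI; simp [pvPassSecs, pvScanSecs, pvScanSecsTitle]
  | cons s rest ih =>
    intro tT aA iI
    simp only [pvPassSecs, pvScanSecs, pvScanSecsTitle]
    rw [pvPassProps_eq (pvProps s) none none none (Or.inl rfl),
        pvScanPropsTitle_eq (pvProps s) tT, pvScanProps_acc "og:video:tag" (pvProps s) aA,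
        pvScanProps_acc "og:image" (pvProps s) iI]
    cases hrT : pvScanProps "og:title" (pvProps s) none with
    | none => simp [pvRes]
    | some rt =>
      cases hrA : pvScanProps "og:video:tag" (pvProps s) none with
      | none => cases rt <;> simp [pvRes]
      | some ra =>
        cases hrI : pvScanProps "og:image" (pvProps s) none with
        | none => cases rt <;> cases ra <;> simp [pvRes]
        | some ri =>
          cases rt <;> cases ra <;> cases ri <;> simp [pvRes, ih]

theorem pvBuild_eq (t a i : Option String) : pvBuild t a i = pvBuildAlt t a i := by
  cases ht : pvTruthy t <;> cases ha : pvTruthy a <;> cases hi : pvTruthy i <;>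
    simp [pvBuild, pvBuildAlt, ht, ha, hi]

-- ===== VERDICT (by name: the statement is the Claim_ definition above) =====
theorem extract_youtube_music_metadata_spec : Claim_equal_extract_youtube_music_metadata := by
  intro metadata _
  unfold Spec_extract_youtube_music_metadata
  unfold extract_youtube_music_metadata extract_youtube_music_metadata_alt
  rw [pvPassSecs_eq]
  cases hT : pvScanSecsTitle (pvOG metadata) none <;>
    cases hA : pvScanSecs "og:video:tag" (pvOG metadata) none <;>
      cases hI : pvScanSecs "og:image" (pvOG metadata) none <;>
        simp [hT, hA, hI, pvBuild_eq]
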